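-- pv_equiv track=rewrite | github.com/VincentGaoHJ/Automatic-Taxonomy-Generation-based-on-Graph-Representation | visualize.py | gen_edges
-- ===== SOURCE A (Python) =====
-- def gen_edges(nodes):
--     node_ids = list(nodes.keys())
--     node_ids.sort(key=lambda x: len(x))
--     edges = []
--     for i in range(len(nodes) - 1):
--         for j in range(i + 1, len(nodes)):
--             if is_parent(node_ids[i], node_ids[j]):
--                 edges.append([node_ids[i], node_ids[j]])
--     return edges
--
-- def is_parent(node_a, node_b):
--     if not node_b.startswith(node_a):
--         return False
--
--     items_a = node_a.split('/')
--     items_b = node_b.split('/')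
--
--     # 差集为1
--     ret_list = [item for item in items_b if item not in items_a]
--     if len(ret_list) != 1:
--         return False
--
--     if len(items_b) - len(items_a) == 1:
--         return True
--     else:
--         return False
-- ===== SOURCE B (Python) =====
-- def gen_edges(nodes):
--     ids = sorted(nodes.keys(), key=len)
--     idset = set(ids)
--     children = {}
--     for b in ids:
--         items_b = b.split('/')
--         for cut in range(len(b)):
--             a = b[:cut]
--             if a in idset and _one_off(a, items_b):
--                 children.setdefault(a, []).append(b)
--     return [[a, b] for a in ids for b in children.get(a, [])]
--
--
-- def _one_off(a, items_b):
--     items_a = a.split('/')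
--     return (len(items_b) - len(items_a) == 1
--             and len([item for item in items_b if item not in items_a]) == 1)
-- ===== Notes on version B (the rewrite author's own statement) =====
-- stated objective: faster
-- what changed: A tests is_parent on every ordered pair of node ids (O(n^2) string tests); B makes one pass that enumerates each id's string prefixes, checks them in a hash set of ids, and groups children per parent, so no pairwise scan remains.
import Mathlib
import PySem

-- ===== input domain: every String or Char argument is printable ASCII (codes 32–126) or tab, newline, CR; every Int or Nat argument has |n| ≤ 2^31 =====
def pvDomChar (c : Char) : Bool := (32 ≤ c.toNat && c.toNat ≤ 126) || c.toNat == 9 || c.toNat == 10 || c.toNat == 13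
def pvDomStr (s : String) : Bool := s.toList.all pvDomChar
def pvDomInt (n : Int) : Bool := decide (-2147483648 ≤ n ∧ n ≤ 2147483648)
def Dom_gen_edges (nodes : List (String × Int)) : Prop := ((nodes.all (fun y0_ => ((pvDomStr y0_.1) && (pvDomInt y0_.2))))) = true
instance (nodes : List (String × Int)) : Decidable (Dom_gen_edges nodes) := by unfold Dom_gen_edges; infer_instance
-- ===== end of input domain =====

-- B replaces A's all-pairs is_parent scan by a single pass that, for each node id, enumerates its
-- string prefixes and looks them up in a set of ids, grouping children per parent (objective: faster).

-- s.split(sep) for a nonempty literal sep (split? is some exactly when sep ≠ "")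
def pySplit (s sep : String) : List String := (PySem.Str.split? s sep).getD []

-- ===== PORT A =====
def isParent (node_a node_b : String) : Bool :=
  if !(PySem.Str.startswith node_b node_a) then false
  else
    let items_a := pySplit node_a "/"
    let items_b := pySplit node_b "/"
    let ret_list := items_b.filter (fun item => !(items_a.contains item))
    if ret_list.length ≠ 1 then false
    else if (items_b.length : Int) - (items_a.length : Int) == 1 then true
    else false

def gen_edges (nodes : List (String × Int)) : List (List String) :=
  let node_ids := PySem.List.sorted (PySem.Dict.ofList nodes).keys (fun x => PySem.Str.len x) false
  let n : Int := ((PySem.Dict.ofList nodes).size : Int)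
  (PySem.List.pyRange 0 (n - 1) 1).foldl (fun edges i =>
    (PySem.List.pyRange (i + 1) n 1).foldl (fun edges j =>
      if isParent (PySem.List.pyGetD node_ids i "") (PySem.List.pyGetD node_ids j "") then
        edges ++ [[PySem.List.pyGetD node_ids i "", PySem.List.pyGetD node_ids j ""]]
      else edges) edges) []

-- ===== PORT B =====
def oneOff (a : String) (items_b : List String) : Bool :=
  let items_a := pySplit a "/"
  ((items_b.length : Int) - (items_a.length : Int) == 1) &&
    ((items_b.filter (fun item => !(items_a.contains item))).length == 1)

def gen_edges_alt (nodes : List (String × Int)) : List (List String) :=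
  let ids := PySem.List.sorted (PySem.Dict.ofList nodes).keys (fun x => PySem.Str.len x) false
  let idset : PySem.Set String := PySem.Set.ofList ids
  -- children.setdefault(a, []).append(b)  ==  children[a] = children.get(a, []) + [b]  ==  Dict.modify a [] (· ++ [b])
  let children : PySem.Dict String (List String) :=
    ids.foldl (fun d b =>
      let items_b := pySplit b "/"
      (PySem.List.pyRange 0 (PySem.Str.len b) 1).foldl (fun d cut =>
        let a := PySem.Str.slice b none (some cut)
        if idset.contains a && oneOff a items_b then d.modify a [] (· ++ [b]) else d) d)
      PySem.Dict.empty
  ids.flatMap (fun a => (children.getD a []).map (fun b => [a, b]))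

-- ===== PRECONDITION & SPEC =====
def Spec_gen_edges (nodes : List (String × Int)) (out : List (List String)) : Prop := out = gen_edges_alt nodes
instance (nodes : List (String × Int)) (out : List (List String)) : Decidable (Spec_gen_edges nodes out) := by unfold Spec_gen_edges; infer_instance

-- ===== CLAIM (what is proved, stated in full; the proofs are below) =====
def Claim_equal_gen_edges : Prop := ∀ (nodes : List (String × Int)), Dom_gen_edges nodes → Spec_gen_edges nodes (gen_edges nodes)

-- ===== LEMMAS AND PROOFS =====

theorem isParent_true_iff (a b : String) :
    isParent a b = true ↔ (a.toList <+: b.toList ∧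
      ((pySplit b "/").filter (fun it => !((pySplit a "/").contains it))).length = 1 ∧
      ((pySplit b "/").length : Int) - ((pySplit a "/").length : Int) = 1) := by
  unfold isParent
  simp only [PySem.Str.startswith_eq]
  by_cases hs : PySem.Chars.startswith b.toList a.toList = true
  · have hp := (PySem.Chars.startswith_iff b.toList a.toList).mp hs
    simp [hs, hp]
  · simp only [Bool.not_eq_true] at hs
    simp [hs]
    intro hp
    exact absurd ((PySem.Chars.startswith_iff b.toList a.toList).mpr hp) (by simp [hs])

theorem len_lt_of_isParent (a b : String) (h : isParent a b = true) :
    PySem.Str.len a < PySem.Str.len b := by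
  rw [isParent_true_iff] at h
  obtain ⟨hpre, -, hd⟩ := h
  rcases lt_or_eq_of_le hpre.length_le with hlt | heq
  · simp only [PySem.Str.len_eq]; exact_mod_cast hlt
  · exact absurd (String.ext_iff.mpr (hpre.eq_of_length heq) ▸ hd) (by simp)

theorem isParent_self (a : String) : isParent a a = false := by
  rw [Bool.eq_false_iff]
  intro h
  exact absurd (len_lt_of_isParent a a h) (lt_irrefl _)

theorem isParent_iff_prefix (a b : String) :
    isParent a b = true ↔
      (a.toList <+: b.toList ∧ a.toList.length < b.toList.length ∧ oneOff a (pySplit b "/") = true) := by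
  rw [isParent_true_iff]
  unfold oneOff
  constructor
  · rintro ⟨h1, h2, h3⟩
    refine ⟨h1, ?_, by simp only [Bool.and_eq_true, beq_iff_eq]; exact ⟨h3, by simpa using h2⟩⟩
    rcases lt_or_eq_of_le h1.length_le with hlt | heq
    · exact hlt
    · exact absurd (String.ext_iff.mpr (h1.eq_of_length heq) ▸ h3) (by simp)
  · rintro ⟨h1, h2, h3⟩
    simp only [Bool.and_eq_true, beq_iff_eq] at h3
    exact ⟨h1, by simpa using h3.2, h3.1⟩

-- the triangular enumeration A performs, as a structural recursion
def pairsA : List String → List (List String)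
  | [] => []
  | x :: t => ((t.filter (fun b => isParent x b)).map (fun b => [x, b])) ++ pairsA t

theorem range_flatMap_eq_pairsA (xs : List String) :
    (List.range xs.length).flatMap
      (fun k => ((xs.drop (k + 1)).filter (fun b => isParent (xs.getD k "") b)).map
        (fun b => [xs.getD k "", b])) = pairsA xs := by
  induction xs with
  | nil => rfl
  | cons x t ih =>
    rw [List.length_cons, List.range_succ_eq_map, List.flatMap_cons, List.flatMap_map]
    simp only [List.getD_cons_succ, List.drop_succ_cons, Nat.succ_eq_add_one, List.getD_cons_zero]
    rw [pairsA]
    exact congrArg _ ih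

-- A's double index loop computes pairsA of the sorted id list
theorem gen_edges_eq_pairsA (nodes : List (String × Int)) :
    gen_edges nodes =
      pairsA (PySem.List.sorted (PySem.Dict.ofList nodes).keys (fun x => PySem.Str.len x) false) := by
  unfold gen_edges
  set ids := PySem.List.sorted (PySem.Dict.ofList nodes).keys (fun x => PySem.Str.len x) false with hids
  have hn : ((PySem.Dict.ofList nodes).size : Int) = ((ids.length : Nat) : Int) := by
    rw [hids, PySem.List.length_sorted]
    simp [PySem.Dict.size, PySem.Dict.keys]
  rw [hn]
  have hstep : ∀ i ∈ PySem.List.pyRange 0 ((ids.length : Int) - 1) 1, ∀ edges : List (List String),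
      (PySem.List.pyRange (i + 1) (ids.length : Int) 1).foldl (fun edges j =>
        if isParent (PySem.List.pyGetD ids i "") (PySem.List.pyGetD ids j "") then
          edges ++ [[PySem.List.pyGetD ids i "", PySem.List.pyGetD ids j ""]]
        else edges) edges =
      edges ++ ((ids.drop (i+1).toNat).filter (fun b => isParent (PySem.List.pyGetD ids i "") b)).map
        (fun b => [PySem.List.pyGetD ids i "", b]) := by
    intro i hi edges
    have h0i : (0:Int) ≤ i := (PySem.List.mem_pyRange_one.mp hi).1
    rw [PySem.List.foldl_pyRange_pyGetD' ids ""
      (fun acc v => if isParent (PySem.List.pyGetD ids i "") v then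
        acc ++ [[PySem.List.pyGetD ids i "", v]] else acc) edges (by omega)]
    rw [PySem.List.foldl_append_if (fun b => isParent (PySem.List.pyGetD ids i "") b)
      (fun b => [PySem.List.pyGetD ids i "", b])]
  rw [PySem.List.foldl_congr_mem' _ _ _ _ hstep]
  rw [PySem.List.foldl_append_eq_flatMap]
  rw [List.nil_append, PySem.List.pyRange_one, List.flatMap_map]
  have hcast : ∀ k : Nat, ((k:Int) + 1).toNat = k + 1 := by intro k; omega
  simp only [zero_add, PySem.List.pyGetD_natCast, hcast]
  have htn : (((ids.length : Int) - 1) - 0).toNat = ids.length - 1 := by omega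
  rw [htn]
  have hext : (List.range (ids.length - 1)).flatMap
      (fun k => ((ids.drop (k+1)).filter (fun b => isParent (ids.getD k "") b)).map
        (fun b => [ids.getD k "", b])) =
    (List.range ids.length).flatMap
      (fun k => ((ids.drop (k+1)).filter (fun b => isParent (ids.getD k "") b)).map
        (fun b => [ids.getD k "", b])) := by
    cases hL : ids.length with
    | zero => rfl
    | succ m =>
      rw [Nat.succ_sub_one, List.range_succ, List.flatMap_append, List.flatMap_cons,
        List.flatMap_nil]
      have : ids.drop (m+1) = [] := List.drop_eq_nil_of_le (by omega)
      rw [this]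
      simp
  rw [hext, range_flatMap_eq_pairsA]

-- on a length-nondecreasing list, A's triangular scan equals scanning the whole list per parent
theorem pairsA_eq_canon (xs : List String)
    (hp : xs.Pairwise (fun a b => PySem.Str.len a ≤ PySem.Str.len b)) :
    pairsA xs = xs.flatMap (fun a => (xs.filter (fun b => isParent a b)).map (fun b => [a, b])) := by
  induction xs with
  | nil => rfl
  | cons x t ih =>
    rw [List.pairwise_cons] at hp
    rw [pairsA, List.flatMap_cons, ih hp.2]
    have h1 : (x :: t).filter (fun b => isParent x b) = t.filter (fun b => isParent x b) :=
      List.filter_cons_of_neg (by simp [isParent_self])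
    rw [h1]
    refine congrArg _ ?_
    refine List.flatMap_congr ?_
    intro a hat
    have h2 : isParent a x = false := by
      rw [Bool.eq_false_iff]
      intro hc
      exact absurd (len_lt_of_isParent a x hc) (not_lt.mpr (hp.1 a hat))
    rw [List.filter_cons_of_neg (by simp [h2])]

-- B-side characterisation ------------------------------------------------

theorem flatMap_if_singleton {α β : Type} (l : List α) (p : α → Bool) (f : α → β) :
    l.flatMap (fun b => if p b then [f b] else []) = (l.filter p).map f := by
  induction l with
  | nil => rfl
  | cons x t ih =>
    by_cases h : p x = true <;> simp [List.flatMap_cons, h, ih]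

-- the prefix-cut pairs B records for one id b, keyed at a, are exactly A's is_parent test
theorem cutLoop_filter (ids : List String) (a b : String) (ha : a ∈ ids) :
    (((PySem.List.pyRange 0 (PySem.Str.len b) 1).filter
        (fun cut => (PySem.Set.ofList ids).contains (PySem.Str.slice b none (some cut)) &&
          oneOff (PySem.Str.slice b none (some cut)) (pySplit b "/"))).map
      (fun cut => (PySem.Str.slice b none (some cut), b))).filter (fun p => p.1 == a) =
    if isParent a b then [(a, b)] else [] := by
  rw [List.filter_map, List.filter_filter, PySem.Str.len_eq, PySem.List.pyRange_one, List.filter_map]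
  simp only [Function.comp_def, zero_add]
  have hslice : ∀ k : Nat, (PySem.Str.slice b none (some (k:Int))) = String.ofList (b.toList.take k) := by
    intro k
    rw [String.ext_iff, PySem.Str.toList_slice, PySem.Chars.slice_eq_listSlice, String.toList_ofList]
    exact PySem.List.slice_to_natCast _ k
  have hM : (((b.toList.length : Int)) - 0).toNat = b.toList.length := by omega
  rw [hM]
  have hfc : List.filter
          (fun x : Nat =>
            PySem.Str.slice b none (some (x:Int)) == a &&
              ((PySem.Set.ofList ids).contains (PySem.Str.slice b none (some (x:Int))) &&
                oneOff (PySem.Str.slice b none (some (x:Int))) (pySplit b "/")))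
          (List.range b.toList.length) =
      List.filter (fun k : Nat => decide (k = a.toList.length ∧ a.toList <+: b.toList) &&
          ((PySem.Set.ofList ids).contains a && oneOff a (pySplit b "/"))) (List.range b.toList.length) := by
    refine List.filter_congr ?_
    intro k hk
    simp only [List.mem_range] at hk
    by_cases htake : b.toList.take k = a.toList
    · have hstr : PySem.Str.slice b none (some (k:Int)) = a := by
        rw [hslice k, String.ext_iff, String.toList_ofList, htake]
      have hkk0 : k = a.toList.length := by
        have hlen := congrArg List.length htake
        rw [List.length_take] at hlen
        omega
      have hpre : a.toList <+: b.toList := List.prefix_iff_eq_take.mpr (by rw [← hkk0]; exact htake.symm)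
      rw [hstr]
      simp [hkk0, hpre]
    · have hstr : ¬ (PySem.Str.slice b none (some (k:Int)) = a) := by
        rw [hslice k, String.ext_iff, String.toList_ofList]
        exact htake
      have hnot : ¬ (k = a.toList.length ∧ a.toList <+: b.toList) := by
        rintro ⟨hkk0, hpre⟩
        exact htake (by rw [hkk0]; exact (List.prefix_iff_eq_take.mp hpre).symm)
      simp only [hnot, decide_false, Bool.false_and]
      simp [hstr]
  rw [hfc]
  by_cases hpre : a.toList <+: b.toList
  · by_cases hC : ((PySem.Set.ofList ids).contains a && oneOff a (pySplit b "/")) = true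
    · have hrw : (fun k : Nat => decide (k = a.toList.length ∧ a.toList <+: b.toList) &&
          ((PySem.Set.ofList ids).contains a && oneOff a (pySplit b "/"))) = (fun k : Nat => k == a.toList.length) := by
        funext k; rw [hC]; simp [hpre]; rw [Bool.eq_iff_iff]; simp
      rw [hrw, List.filter_beq, List.count_range]
      rw [Bool.and_eq_true, PySem.Set.contains_iff] at hC
      by_cases hk0N : a.toList.length < b.toList.length
      · have hP : isParent a b = true := (isParent_iff_prefix a b).mpr ⟨hpre, hk0N, hC.2⟩
        have hsl : PySem.Str.slice b none (some (a.toList.length : Int)) = a := by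
          rw [hslice _, String.ext_iff, String.toList_ofList]
          exact (List.prefix_iff_eq_take.mp hpre).symm
        simp only [hk0N, if_true, hP, List.replicate_one, List.map_cons, List.map_nil, hsl]
      · have hP : isParent a b = false := by
          rw [Bool.eq_false_iff]; intro hc
          exact hk0N ((isParent_iff_prefix a b).mp hc).2.1
        have hlen : b.length ≤ a.length := by
          have h1 : b.toList.length ≤ a.toList.length := Nat.le_of_not_lt hk0N
          simpa using h1
        simp [hP, hlen]
    · have hrw : (fun k : Nat => decide (k = a.toList.length ∧ a.toList <+: b.toList) &&
          ((PySem.Set.ofList ids).contains a && oneOff a (pySplit b "/"))) = (fun _ : Nat => false) := by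
        rw [Bool.not_eq_true] at hC
        funext k; rw [hC]; simp
      have hP : isParent a b = false := by
        rw [Bool.eq_false_iff]; intro hc
        refine hC ?_
        rw [Bool.and_eq_true, PySem.Set.contains_iff]
        exact ⟨(PySem.Set.mem_ofList _ _).mpr ha, ((isParent_iff_prefix a b).mp hc).2.2⟩
      rw [hrw]
      simp [hP]
  · have hrw : (fun k : Nat => decide (k = a.toList.length ∧ a.toList <+: b.toList) &&
        ((PySem.Set.ofList ids).contains a && oneOff a (pySplit b "/"))) = (fun _ : Nat => false) := by
      funext k; simp [hpre]
    have hP : isParent a b = false := by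
      rw [Bool.eq_false_iff]; intro hc
      exact hpre ((isParent_iff_prefix a b).mp hc).1
    rw [hrw]
    simp [hP]

def hitsOf (ids : List String) (b : String) : List (String × String) :=
  ((PySem.List.pyRange 0 (PySem.Str.len b) 1).filter
      (fun cut => (PySem.Set.ofList ids).contains (PySem.Str.slice b none (some cut)) &&
        oneOff (PySem.Str.slice b none (some cut)) (pySplit b "/"))).map
    (fun cut => (PySem.Str.slice b none (some cut), b))

theorem gen_edges_alt_eq_canon (nodes : List (String × Int)) :
    gen_edges_alt nodes =
      (PySem.List.sorted (PySem.Dict.ofList nodes).keys (fun x => PySem.Str.len x) false).flatMap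
        (fun a => ((PySem.List.sorted (PySem.Dict.ofList nodes).keys (fun x => PySem.Str.len x) false).filter
          (fun b => isParent a b)).map (fun b => [a, b])) := by
  unfold gen_edges_alt
  set ids := PySem.List.sorted (PySem.Dict.ofList nodes).keys (fun x => PySem.Str.len x) false with hids
  have hinner : ∀ (d : PySem.Dict String (List String)) (b : String),
      (PySem.List.pyRange 0 (PySem.Str.len b) 1).foldl (fun d cut =>
        if (PySem.Set.ofList ids).contains (PySem.Str.slice b none (some cut)) &&
            oneOff (PySem.Str.slice b none (some cut)) (pySplit b "/") then
          d.modify (PySem.Str.slice b none (some cut)) [] (· ++ [b]) else d) d =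
      (hitsOf ids b).foldl (fun d p => d.modify p.1 [] (· ++ [p.2])) d := by
    intro d b
    rw [hitsOf, List.foldl_map, List.foldl_filter]
  have hchildren : ids.foldl (fun d b =>
      (PySem.List.pyRange 0 (PySem.Str.len b) 1).foldl (fun d cut =>
        if (PySem.Set.ofList ids).contains (PySem.Str.slice b none (some cut)) &&
            oneOff (PySem.Str.slice b none (some cut)) (pySplit b "/") then
          d.modify (PySem.Str.slice b none (some cut)) [] (· ++ [b]) else d) d)
      PySem.Dict.empty =
      (ids.flatMap (hitsOf ids)).foldl (fun d p => d.modify p.1 [] (· ++ [p.2])) PySem.Dict.empty := by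
    rw [List.foldl_flatMap]
    exact PySem.List.foldl_congr_mem' _ _ _ _ (fun b _ d => hinner d b)
  show ids.flatMap (fun a => ((ids.foldl _ PySem.Dict.empty).getD a []).map (fun b => [a, b])) = _
  rw [hchildren]
  refine List.flatMap_congr ?_
  intro a ha
  rw [PySem.Dict.getD_foldl_modify_append, PySem.Dict.getD_empty, List.nil_append,
    List.filter_flatMap]
  have : ∀ b ∈ ids, (hitsOf ids b).filter (fun p => p.1 == a) = if isParent a b then [(a, b)] else [] :=
    fun b _ => cutLoop_filter ids a b ha
  rw [List.flatMap_congr this, flatMap_if_singleton ids (fun b => isParent a b) (fun b => (a, b))]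
  rw [List.map_map, List.map_map]
  rfl

-- ===== VERDICT (by name: the statement is the Claim_ definition above) =====
theorem gen_edges_spec : Claim_equal_gen_edges := by
  intro nodes _
  unfold Spec_gen_edges
  rw [gen_edges_eq_pairsA, gen_edges_alt_eq_canon,
    pairsA_eq_canon _ (PySem.List.sorted_pairwise _ _)]
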